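-- pv_equiv track=rewrite | github.com/attila0x2A/univ | Dipl/text/plot.py | cords
-- ===== SOURCE A (Python) =====
-- def cords(gen):
--     def nxt(x,y,c):
--         if c == 'A': return x-1,y
--         if c == 'G': return x+1,y
--         if c == 'C': return x,y+1
--         return x, y-1
--     x,y=0,0
--     xs = [0]
--     ys = [0]
--     for c in gen:
--         x,y = nxt(x,y,c)
--         xs.append(x)
--         ys.append(y)
--     return xs,ys
-- ===== SOURCE B (Python) =====
-- def _prefix(ds):
--     out = [0]
--     a = 0
--     for d in ds:
--         a += d
--         out.append(a)
--     return out
--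
-- def cords(gen):
--     D = {'A': (-1, 0), 'G': (1, 0), 'C': (0, 1)}
--     deltas = [D.get(c, (0, -1)) for c in gen]
--     return _prefix([d[0] for d in deltas]), _prefix([d[1] for d in deltas])
-- ===== Notes on version B (the rewrite author's own statement) =====
-- stated objective: alternative
-- what changed: Replaces the single interleaved running-position loop with a classify-then-prefix-sum structure: each character is mapped once to a (dx,dy) delta via a dict lookup, and xs and ys are computed as two independent cumulative sums.
import Mathlib
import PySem

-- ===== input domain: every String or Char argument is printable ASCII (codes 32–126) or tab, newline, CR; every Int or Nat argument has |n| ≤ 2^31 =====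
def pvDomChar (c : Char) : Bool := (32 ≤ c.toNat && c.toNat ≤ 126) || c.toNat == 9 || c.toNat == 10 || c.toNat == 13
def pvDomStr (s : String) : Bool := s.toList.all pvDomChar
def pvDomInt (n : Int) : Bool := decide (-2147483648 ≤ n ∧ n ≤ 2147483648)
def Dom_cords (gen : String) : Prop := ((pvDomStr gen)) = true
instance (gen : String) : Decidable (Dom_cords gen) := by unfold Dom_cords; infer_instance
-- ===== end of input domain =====

-- B replaces A's interleaved running-position loop with a classify-then-prefix-sum
-- decomposition (delta list once, then two independent cumulative sums); objective: alternative.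


-- ===== PORT A =====
def cordsNxt (x y : Int) (c : Char) : Int × Int :=
  if c = 'A' then (x - 1, y)
  else if c = 'G' then (x + 1, y)
  else if c = 'C' then (x, y + 1)
  else (x, y - 1)

def cords (gen : String) : List Int × List Int :=
  let st := gen.toList.foldl
    (fun (s : Int × Int × List Int × List Int) c =>
      let p := cordsNxt s.1 s.2.1 c
      (p.1, p.2, s.2.2.1 ++ [p.1], s.2.2.2 ++ [p.2]))
    (0, 0, [0], [0])
  (st.2.2.1, st.2.2.2)

-- ===== PORT B =====
def cordsDict : PySem.Dict Char (Int × Int) :=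
  PySem.Dict.mk [('A', (-1, 0)), ('G', (1, 0)), ('C', (0, 1))]

def prefixSums (ds : List Int) : List Int :=
  (ds.foldl (fun (s : Int × List Int) d => (s.1 + d, s.2 ++ [s.1 + d])) (0, [0])).2

def cords_alt (gen : String) : List Int × List Int :=
  let deltas := gen.toList.map (fun c => cordsDict.getD c (0, -1))
  (prefixSums (deltas.map (·.1)), prefixSums (deltas.map (·.2)))

-- ===== PRECONDITION & SPEC =====
def Spec_cords (gen : String) (out : List Int × List Int) : Prop := out = cords_alt gen
instance (gen : String) (out : List Int × List Int) : Decidable (Spec_cords gen out) := by unfold Spec_cords; infer_instance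

-- ===== CLAIM (what is proved, stated in full; the proofs are below) =====
def Claim_equal_cords : Prop := ∀ (gen : String), Dom_cords gen → Spec_cords gen (cords gen)

-- ===== LEMMAS AND PROOFS =====

-- the strictly-increasing tail of a cumulative sum starting (exclusively) at a
def cumFrom (a : Int) : List Int → List Int
  | [] => []
  | d :: ds => (a + d) :: cumFrom (a + d) ds

theorem cordsNxt_delta (x y : Int) (c : Char) :
    cordsNxt x y c = (x + (cordsDict.getD c (0, -1)).1, y + (cordsDict.getD c (0, -1)).2) := by
  by_cases hA : c = 'A'
  · simp [cordsNxt, cordsDict, PySem.Dict.getD, PySem.Dict.get?, hA, sub_eq_add_neg]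
  · by_cases hG : c = 'G'
    · simp [cordsNxt, cordsDict, PySem.Dict.getD, PySem.Dict.get?, hA, hG]
    · by_cases hC : c = 'C'
      · simp [cordsNxt, cordsDict, PySem.Dict.getD, PySem.Dict.get?, hC, hA]
      · have h1 : ('A' == c) = false := by simp [Ne.symm hA]
        have h2 : ('G' == c) = false := by simp [Ne.symm hG]
        have h3 : ('C' == c) = false := by simp [Ne.symm hC]
        simp [cordsNxt, cordsDict, PySem.Dict.getD, PySem.Dict.get?, List.find?,
              h1, h2, h3, hA, hG, hC, sub_eq_add_neg]

theorem prefix_fold (ds : List Int) : ∀ (a : Int) (out : List Int),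
    ds.foldl (fun (s : Int × List Int) d => (s.1 + d, s.2 ++ [s.1 + d])) (a, out)
      = (a + ds.sum, out ++ cumFrom a ds) := by
  induction ds with
  | nil => intro a out; simp [cumFrom]
  | cons d ds ih =>
      intro a out
      simp only [List.foldl, cumFrom, ih, List.sum_cons, Prod.mk.injEq]
      exact ⟨by ring, by simp⟩

theorem prefixSums_eq (ds : List Int) : prefixSums ds = 0 :: cumFrom 0 ds := by
  simp [prefixSums, prefix_fold]

theorem cords_fold (l : List Char) : ∀ (x y : Int) (xs ys : List Int),
    l.foldl
      (fun (s : Int × Int × List Int × List Int) c =>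
        let p := cordsNxt s.1 s.2.1 c
        (p.1, p.2, s.2.2.1 ++ [p.1], s.2.2.2 ++ [p.2]))
      (x, y, xs, ys)
      = ((l.foldl (fun s c => (cordsNxt s.1 s.2 c)) (x, y)).1,
         (l.foldl (fun s c => (cordsNxt s.1 s.2 c)) (x, y)).2,
         xs ++ cumFrom x (l.map (fun c => (cordsDict.getD c (0, -1)).1)),
         ys ++ cumFrom y (l.map (fun c => (cordsDict.getD c (0, -1)).2))) := by
  induction l with
  | nil => intro x y xs ys; simp [cumFrom]
  | cons c l ih =>
      intro x y xs ys
      simp only [List.foldl, List.map, cumFrom]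
      rw [ih]
      simp [cordsNxt_delta]

-- ===== VERDICT (by name: the statement is the Claim_ definition above) =====
theorem cords_spec : Claim_equal_cords := by
  intro gen _
  unfold Spec_cords cords cords_alt
  rw [cords_fold]
  simp [prefixSums_eq, Function.comp_def]
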